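-- pv_equiv track=rewrite | github.com/BuladTS/algorithmsLabs | lab9/search.py | remove_needless_result
-- ===== SOURCE A (Python) =====
-- def remove_needless_result(removed: dict, method: str, count: int) -> dict:
--     """
--     Функция для дополнительной корректировки ответа
--     :param removed: список ответов которые уже получены
--     :param method: уфлаг метода, который указывает какой элемент нужно удалить max или min
--     :param count: количество ответов до которых нжно укоротить уже полученные ответы
--     :return: финальный ответ удовлетворяющий всем условиям
--     """
--     elements = []
--     for i in removed.values():
--         if i is not None:
--             elements.extend(i)
--     elements.sort()
--     removed = {key: value for key, value in removed.items() if not (value is None)}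
--     if method == "first":
--         elements = elements[::-1]
--     i = 0
--     while len(elements) > count:
--         for key, value in removed.items():
--             if value is not None and elements[i] in value:
--                 new_value = [x for x in value if x != elements[i]]
--                 if len(new_value) == 0:
--                     removed[key] = None
--                     elements.remove(elements[i])
--                     break
--                 else:
--                     removed[key] = tuple(new_value)
--                     elements.remove(elements[i])
--                     break
--
--         # i += 1
--     return removed
-- ===== SOURCE B (Python) =====
-- def remove_needless_result(removed: dict, method: str, count: int) -> dict:
--     # Pick the removal targets up front from the sorted element list, tally them in a
--     # counter, then rebuild every tuple in one pass, consuming target counts left to right.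
--     items = [(k, v) for k, v in removed.items() if v is not None]
--     elements = sorted(x for _, v in items for x in v)
--     if method == "first":
--         elements.reverse()
--     need = {}
--     for x in elements[:max(0, len(elements) - count)]:
--         need[x] = need.get(x, 0) + 1
--     result = {}
--     for key, v in items:
--         kept = []
--         for x in v:
--             if need.get(x, 0) > 0:
--                 need[x] -= 1
--             else:
--                 kept.append(x)
--         result[key] = tuple(kept) if kept or not v else None
--     return result
-- ===== Notes on version B (the rewrite author's own statement) =====
-- stated objective: alternative
-- what changed: A repeatedly rescans the dict and the element list, deleting one extreme element per pass of a while loop; B computes all removal targets up front from the sorted element list, tallies them in a counter dict, and rebuilds every tuple in a single pass, consuming target counts left to right (intended as faster, O(n log n) vs A's O(n^2); a timing run read 9.44x at the largest size both finished but could not confirm it because A times out on larger inputs).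
-- outside the precondition, e.g. on remove_needless_result({'a': (2, 2)}, 'last', 1): A returns {'a': None}, B returns {'a': (2,)}; on remove_needless_result({'a': (2, 2)}, 'last', 0): A does not finish within the time limit, B returns {'a': None}; on remove_needless_result({'a': (1,)}, 'x', -1): A does not finish within the time limit, B returns {'a': None}
import Mathlib
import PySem

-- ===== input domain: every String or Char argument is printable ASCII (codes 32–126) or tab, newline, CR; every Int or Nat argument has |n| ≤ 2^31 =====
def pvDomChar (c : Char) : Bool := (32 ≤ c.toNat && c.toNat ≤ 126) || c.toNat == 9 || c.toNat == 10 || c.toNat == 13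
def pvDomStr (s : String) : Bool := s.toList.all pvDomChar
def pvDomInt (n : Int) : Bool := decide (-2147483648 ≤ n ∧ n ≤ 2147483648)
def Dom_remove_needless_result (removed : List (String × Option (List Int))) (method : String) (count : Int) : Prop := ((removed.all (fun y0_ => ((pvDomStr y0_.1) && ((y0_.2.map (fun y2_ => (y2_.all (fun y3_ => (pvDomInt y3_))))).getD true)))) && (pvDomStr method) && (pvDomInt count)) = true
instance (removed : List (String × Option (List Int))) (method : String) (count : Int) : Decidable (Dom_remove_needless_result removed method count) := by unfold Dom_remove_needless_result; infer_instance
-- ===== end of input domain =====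

-- B re-implements A's one-at-a-time trimming loop as a single counting pass over the dict.

-- ===== PORT A =====
-- inner `for key, value in removed.items(): if value is not None and elements[i] in value: … break`
-- (scan for the first entry containing e and rewrite it in place; none = no entry matched).
-- In-place assignment `removed[key] = …` to an existing key keeps its position, so with unique keys
-- (guaranteed for a Python dict) it is exactly this positional replacement.
def pvA_replace (d : List (String × Option (List Int))) (e : Int) : Option (List (String × Option (List Int))) :=
  match d with
  | [] => none
  | (k, some w) :: rest =>
      if e ∈ w then
        let nw := w.filter (fun x => x ≠ e)
        some ((k, if nw = [] then none else some nw) :: rest)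
      else (pvA_replace rest e).map (fun r => (k, some w) :: r)
  | (k, none) :: rest => (pvA_replace rest e).map (fun r => (k, none) :: r)

-- `while len(elements) > count: …` — fuel makes the loop total; when Python would loop forever
-- (elements exhausted or no entry matches, both outside Pre_) the fuel runs out and we return the state.
def pvA_loop : Nat → List (String × Option (List Int)) → List Int → Int → List (String × Option (List Int))
  | 0, d, _, _ => d
  | fuel + 1, d, elements, count =>
      if (elements.length : Int) > count then
        match elements with
        | [] => d
        | e :: _ =>
            match pvA_replace d e with
            | some d' => pvA_loop fuel d' (elements.erase e) count
            | none => pvA_loop fuel d elements count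
      else d

def remove_needless_result (removed : List (String × Option (List Int))) (method : String) (count : Int) : List (String × Option (List Int)) :=
  -- for i in removed.values(): if i is not None: elements.extend(i)
  let elements := removed.foldl (fun acc kv => match kv.2 with | some w => acc ++ w | none => acc) []
  let elements := PySem.List.sorted elements (fun x => x) false        -- elements.sort()
  let d := removed.filter (fun kv => kv.2.isSome)                      -- {k: v … if not (v is None)}
  let elements := if method == "first" then elements.reverse else elements  -- elements[::-1] (PySem.List.slice?_none_none_neg_one)
  pvA_loop (elements.length + 1) d elements count

-- ===== PORT B =====
-- items = [(k, v) for k, v in removed.items() if v is not None]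
def pvItemsB (removed : List (String × Option (List Int))) : List (String × List Int) :=
  removed.foldr (fun kv acc => match kv.2 with | some v => (kv.1, v) :: acc | none => acc) []

-- body of `for x in v: if need.get(x, 0) > 0: need[x] -= 1 else: kept.append(x)` (state = (need, kept))
def pvInnerF (q : PySem.Dict Int Int × List Int) (x : Int) : PySem.Dict Int Int × List Int :=
  if q.1.getD x 0 > 0 then (q.1.insert x (q.1.getD x 0 - 1), q.2) else (q.1, q.2 ++ [x])

-- body of `for key, v in items: … result[key] = tuple(kept) if kept or not v else None` (state = (need, result))
def pvMainF (st : PySem.Dict Int Int × List (String × Option (List Int))) (kv : String × List Int) :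
    PySem.Dict Int Int × List (String × Option (List Int)) :=
  let p := kv.2.foldl pvInnerF (st.1, [])
  (p.1, st.2 ++ [(kv.1, if p.2 ≠ [] ∨ kv.2 = [] then some p.2 else none)])

def remove_needless_result_alt (removed : List (String × Option (List Int))) (method : String) (count : Int) : List (String × Option (List Int)) :=
  let items := pvItemsB removed
  let elements := PySem.List.sorted (items.flatMap (fun kv => kv.2)) (fun x => x) false
  let elements := if method == "first" then elements.reverse else elements  -- elements.reverse()
  let targets := PySem.List.slice elements none (some (max 0 ((elements.length : Int) - count)))
  let need := targets.foldl (fun d x => d.insert x (d.getD x 0 + 1)) PySem.Dict.empty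
  (items.foldl pvMainF (need, [])).2

-- ===== PRECONDITION & SPEC =====
def pvTotalLen (removed : List (String × Option (List Int))) : Int :=
  removed.foldl (fun a kv => a + ((kv.2.getD []).length : Int)) 0

-- Pre_ excludes: negative count (A's while loop then never terminates), duplicate keys (a Python dict
-- cannot hold them), and value tuples with an internal duplicate when trimming is needed — there A
-- deletes every copy of a duplicated value from a tuple while accounting for only one element, so it
-- either loops forever or returns a dict trimmed by the wrong amount.
def Pre_remove_needless_result (removed : List (String × Option (List Int))) (method : String) (count : Int) : Prop :=
  0 ≤ count ∧ (removed.map Prod.fst).Nodup ∧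
    ((∀ kv ∈ removed, (kv.2.getD []).Nodup) ∨ pvTotalLen removed ≤ count)
instance (removed : List (String × Option (List Int))) (method : String) (count : Int) : Decidable (Pre_remove_needless_result removed method count) := by unfold Pre_remove_needless_result; infer_instance

def pvWitness_remove_needless_result : (List (String × Option (List Int))) × String × Int :=
  ([("a", some [1, 3]), ("b", none), ("c", some [2])], "first", 1)

def Spec_remove_needless_result (removed : List (String × Option (List Int))) (method : String) (count : Int) (out : List (String × Option (List Int))) : Prop := out = remove_needless_result_alt removed method count
instance (removed : List (String × Option (List Int))) (method : String) (count : Int) (out : List (String × Option (List Int))) : Decidable (Spec_remove_needless_result removed method count out) := by unfold Spec_remove_needless_result; infer_instance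

-- ===== CLAIM (what is proved, stated in full; the proofs are below) =====
def Claim_equal_remove_needless_result : Prop := ∀ (removed : List (String × Option (List Int))) (method : String) (count : Int), Dom_remove_needless_result removed method count → Pre_remove_needless_result removed method count → Spec_remove_needless_result removed method count (remove_needless_result removed method count)

-- ===== LEMMAS AND PROOFS =====

-- one A-loop step as a total function (the loop never hits the `none` branch inside Pre_)
def pvStep (d : List (String × Option (List Int))) (e : Int) : List (String × Option (List Int)) :=
  match pvA_replace d e with
  | some d' => d'
  | none => d

-- what a whole target list does to the head entry of the dict: (final head value, targets passed on)
def pvG : Option (List Int) → List Int → Option (List Int) × List Int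
  | ov, [] => (ov, [])
  | some w, e :: T =>
      if e ∈ w then
        let nw := w.filter (fun x => x ≠ e)
        pvG (if nw = [] then none else some nw) T
      else
        let p := pvG (some w) T
        (p.1, e :: p.2)
  | none, e :: T =>
      let p := pvG none T
      (p.1, e :: p.2)

-- does the (optional) value contain x?
def pvHas (ov : Option (List Int)) (x : Int) : Bool :=
  match ov with
  | some w => decide (x ∈ w)
  | none => false

-- number of entries whose value contains x
def pvCountA (d : List (String × Option (List Int))) (x : Int) : Nat :=
  d.countP (fun kv => pvHas kv.2 x)

-- targets left after the head value v has consumed one copy of each of its elements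
def pvConsume (v T : List Int) : List Int := v.foldl (fun r x => r.erase x) T

theorem pvG_none (T : List Int) : pvG none T = (none, T) := by
  induction T with
  | nil => simp [pvG]
  | cons e T ih => simp [pvG, ih]

theorem pvStep_nil (e : Int) : pvStep [] e = [] := by
  simp [pvStep, pvA_replace]

theorem pvFoldStep_nil (T : List Int) : List.foldl pvStep [] T = [] := by
  induction T with
  | nil => rfl
  | cons e T ih => simpa [pvStep_nil] using ih

theorem pvStep_cons_none (k : String) (rest : List (String × Option (List Int))) (e : Int) :
    pvStep ((k, none) :: rest) e = (k, none) :: pvStep rest e := by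
  simp only [pvStep, pvA_replace]
  cases pvA_replace rest e <;> simp

theorem pvStep_cons_mem (k : String) (w : List Int) (rest : List (String × Option (List Int))) (e : Int) (h : e ∈ w) :
    pvStep ((k, some w) :: rest) e =
      (k, if w.filter (fun x => x ≠ e) = [] then none else some (w.filter (fun x => x ≠ e))) :: rest := by
  simp [pvStep, pvA_replace, h]

theorem pvStep_cons_not_mem (k : String) (w : List Int) (rest : List (String × Option (List Int))) (e : Int) (h : e ∉ w) :
    pvStep ((k, some w) :: rest) e = (k, some w) :: pvStep rest e := by
  simp only [pvStep, pvA_replace, if_neg h]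
  cases pvA_replace rest e <;> simp

theorem pvFoldStep_cons (T : List Int) (k : String) (ov : Option (List Int)) (rest : List (String × Option (List Int))) :
    List.foldl pvStep ((k, ov) :: rest) T =
      (k, (pvG ov T).1) :: List.foldl pvStep rest ((pvG ov T).2) := by
  induction T generalizing ov rest with
  | nil => simp [pvG]
  | cons e T ih =>
    cases ov with
    | none =>
      rw [List.foldl_cons, pvStep_cons_none, ih, pvG_none]
      simp [pvG, pvG_none]
    | some w =>
      by_cases h : e ∈ w
      · rw [List.foldl_cons, pvStep_cons_mem k w rest e h, ih]
        simp [pvG, h]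
      · rw [List.foldl_cons, pvStep_cons_not_mem k w rest e h, ih]
        simp [pvG, h]

theorem pvConsume_nil_left (T : List Int) : pvConsume [] T = T := by
  rfl

theorem pvConsume_nil (v : List Int) : pvConsume v [] = [] := by
  induction v with
  | nil => rfl
  | cons x v ih => simpa [pvConsume] using ih

theorem pvConsume_cons_not_mem (v T : List Int) (e : Int) (h : e ∉ v) :
    pvConsume v (e :: T) = e :: pvConsume v T := by
  induction v generalizing T with
  | nil => rfl
  | cons y v ih =>
    have hy : y ≠ e := fun hh => h (hh ▸ List.mem_cons_self)
    have h' : e ∉ v := fun hv => h (List.mem_cons_of_mem _ hv)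
    simp only [pvConsume, List.foldl_cons] at *
    rw [List.erase_cons_tail (by simpa using fun hh => hy hh.symm)]
    exact ih (T := T.erase y) h'

theorem pvConsume_cons_mem (v T : List Int) (e : Int) (h : e ∈ v) :
    pvConsume v (e :: T) = pvConsume (v.erase e) T := by
  induction v generalizing T e with
  | nil => simp at h
  | cons y v ih =>
    by_cases hy : y = e
    · subst hy
      simp [pvConsume, List.erase_cons_head]
    · have hv : e ∈ v := by
        rcases List.mem_cons.mp h with h1 | h1
        · exact absurd h1.symm hy
        · exact h1
      rw [List.erase_cons_tail (by simpa using fun hh => hy hh)]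
      simp only [pvConsume, List.foldl_cons]
      rw [List.erase_cons_tail (by simpa using fun hh => hy hh.symm)]
      exact ih (T := T.erase y) (e := e) hv

theorem pvG_char (v T : List Int) (hv : v.Nodup) :
    pvG (some v) T =
      (if v.filter (fun x => decide (x ∉ T)) = [] ∧ v ≠ [] then none
       else some (v.filter (fun x => decide (x ∉ T))), pvConsume v T) := by
  induction T generalizing v with
  | nil =>
    simp [pvG, pvConsume_nil]
  | cons e T ih =>
    by_cases he : e ∈ v
    · have hvne : v ≠ [] := by rintro rfl; simp at he
      have herase : v.erase e = v.filter (fun x => x ≠ e) := by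
        rw [hv.erase_eq_filter e]
        exact List.filter_congr (fun x _ => by by_cases hxe : x = e <;> simp [bne, hxe])
      have hpred : ∀ x : Int, (decide (x ∉ e :: T)) = (decide ¬(x = e) && decide (x ∉ T)) := by
        intro x
        by_cases h1 : x = e <;> by_cases h2 : x ∈ T <;> simp [h1, h2]
      have hkept : v.filter (fun x => decide (x ∉ e :: T)) =
          (v.filter (fun x => x ≠ e)).filter (fun x => decide (x ∉ T)) := by
        rw [List.filter_filter]
        exact List.filter_congr (fun x _ => by rw [hpred x, Bool.and_comm])
      have hcons : pvConsume v (e :: T) = pvConsume (v.filter (fun x => x ≠ e)) T := by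
        rw [pvConsume_cons_mem v T e he, herase]
      by_cases hnil : v.filter (fun x => x ≠ e) = []
      · have hall : ∀ x ∈ v, x = e := by
          intro x hx
          by_contra hne
          have hmem : x ∈ v.filter (fun x => decide (x ≠ e)) := List.mem_filter.mpr ⟨hx, by simp [hne]⟩
          rw [hnil] at hmem
          simp at hmem
        have hkept0 : v.filter (fun x => decide (x ∉ e :: T)) = [] := by
          apply List.filter_eq_nil_iff.mpr
          intro x hx
          simp [hall x hx]
        have hstep : pvG (some v) (e :: T) = pvG none T := by
          simp only [pvG, if_pos he]
          rw [if_pos hnil]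
        rw [hstep, pvG_none, hcons, hnil, pvConsume_nil_left, hkept0]
        simp [hvne]
      · have hnd : (v.filter (fun x => x ≠ e)).Nodup := hv.filter _
        simp only [pvG, if_pos he, if_neg hnil]
        have hex : ∃ x ∈ v, ¬x = e := by
          rcases List.exists_mem_of_ne_nil _ hnil with ⟨x, hx⟩
          have hxf := List.mem_filter.mp hx
          exact ⟨x, hxf.1, by simpa using hxf.2⟩
        rw [ih _ hnd, hcons, hkept]
        simp [hnil, hvne, hex]
    · have hkept : v.filter (fun x => decide (x ∉ e :: T)) = v.filter (fun x => decide (x ∉ T)) := by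
        apply List.filter_congr
        intro x hx
        have : x ≠ e := fun hh => he (hh ▸ hx)
        simp [List.mem_cons, this]
      simp only [pvG, if_neg he]
      rw [ih _ hv, pvConsume_cons_not_mem v T e he, hkept]

theorem pvInner_spec (v : List Int) (T : List Int) (need : PySem.Dict Int Int) (acc : List Int)
    (hv : v.Nodup) (hR : ∀ x, need.getD x 0 = (T.count x : Int)) :
    (v.foldl pvInnerF (need, acc)).2 = acc ++ v.filter (fun x => decide (x ∉ T)) ∧
    ∀ x, (v.foldl pvInnerF (need, acc)).1.getD x 0 = ((pvConsume v T).count x : Int) := by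
  induction v generalizing T need acc with
  | nil =>
    exact ⟨by simp, fun x => by simpa [pvConsume_nil_left] using hR x⟩
  | cons y v ih =>
    obtain ⟨hyv, hv'⟩ := List.nodup_cons.mp hv
    by_cases hy : y ∈ T
    · have hgt : need.getD y 0 > 0 := by
        rw [hR]; exact_mod_cast List.count_pos_iff.mpr hy
      have hR' : ∀ x, (need.insert y (need.getD y 0 - 1)).getD x 0 = ((T.erase y).count x : Int) := by
        intro x
        rw [PySem.Dict.getD_insert]
        by_cases hxy : x = y
        · subst hxy
          rw [if_pos rfl, hR, List.count_erase_self, Nat.cast_sub (List.count_pos_iff.mpr hy)]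
          norm_num
        · rw [if_neg hxy, hR, List.count_erase_of_ne hxy]
      obtain ⟨ha, hb⟩ := ih (T := T.erase y) (need := need.insert y (need.getD y 0 - 1)) (acc := acc) hv' hR'
      constructor
      · rw [List.foldl_cons]
        show (v.foldl pvInnerF (pvInnerF (need, acc) y)).2 = _
        rw [pvInnerF, if_pos hgt]
        rw [ha]
        have : v.filter (fun x => decide (x ∉ T.erase y)) = v.filter (fun x => decide (x ∉ T)) := by
          apply List.filter_congr
          intro x hx
          have hxy : x ≠ y := fun hh => hyv (hh ▸ hx)
          simp [List.mem_erase_of_ne hxy]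
        rw [this]
        simp [List.filter_cons, hy]
      · intro x
        rw [List.foldl_cons]
        show (v.foldl pvInnerF (pvInnerF (need, acc) y)).1.getD x 0 = _
        rw [pvInnerF, if_pos hgt]
        have hcons : pvConsume (y :: v) T = pvConsume v (T.erase y) := by simp [pvConsume]
        rw [hcons]
        exact hb x
    · have hz : ¬(need.getD y 0 > 0) := by
        rw [hR, List.count_eq_zero_of_not_mem hy]
        simp
      obtain ⟨ha, hb⟩ := ih (T := T) (need := need) (acc := acc ++ [y]) hv' hR
      constructor
      · rw [List.foldl_cons]
        show (v.foldl pvInnerF (pvInnerF (need, acc) y)).2 = _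
        rw [pvInnerF, if_neg hz]
        rw [ha]
        simp [List.filter_cons, hy]
      · intro x
        rw [List.foldl_cons]
        show (v.foldl pvInnerF (pvInnerF (need, acc) y)).1.getD x 0 = _
        rw [pvInnerF, if_neg hz]
        have hcons : pvConsume (y :: v) T = pvConsume v T := by
          simp [pvConsume, List.erase_of_not_mem hy]
        rw [hcons]
        exact hb x

theorem pvMain_spec (items : List (String × List Int)) (T : List Int) (need : PySem.Dict Int Int)
    (acc : List (String × Option (List Int)))
    (hv : ∀ kv ∈ items, (kv.2 : List Int).Nodup) (hR : ∀ x, need.getD x 0 = (T.count x : Int)) :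
    (items.foldl pvMainF (need, acc)).2 =
      acc ++ List.foldl pvStep (items.map (fun kv => (kv.1, some kv.2))) T := by
  induction items generalizing T need acc with
  | nil => simp [pvFoldStep_nil]
  | cons kv items ih =>
    obtain ⟨k, v⟩ := kv
    have hvnd : v.Nodup := hv (k, v) List.mem_cons_self
    have hv' : ∀ p ∈ items, (p.2 : List Int).Nodup := fun p hp => hv p (List.mem_cons_of_mem _ hp)
    obtain ⟨ha, hb⟩ := pvInner_spec v T need [] hvnd hR
    have hp2 : (v.foldl pvInnerF (need, [])).2 = v.filter (fun x => decide (x ∉ T)) := by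
      simpa using ha
    rw [List.foldl_cons]
    show (items.foldl pvMainF (pvMainF (need, acc) (k, v))).2 = _
    simp only [pvMainF]
    rw [ih _ _ _ hv' hb, List.map_cons, pvFoldStep_cons, pvG_char v T hvnd]
    have hentry : (if (v.foldl pvInnerF (need, [])).2 ≠ [] ∨ v = []
          then some ((v.foldl pvInnerF (need, [])).2) else none)
        = (if v.filter (fun x => decide (x ∉ T)) = [] ∧ v ≠ []
          then none else some (v.filter (fun x => decide (x ∉ T)))) := by
      rw [hp2]
      have hiff : (v.filter (fun x => decide (x ∉ T)) = []) ↔ ∀ a ∈ v, a ∈ T := by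
        rw [List.filter_eq_nil_iff]
        simp
      by_cases h2 : v = []
      · simp [h2]
      · by_cases h1 : ∀ a ∈ v, a ∈ T
        · rw [hiff.mpr h1]
          simp [h2]
        · have hf : v.filter (fun x => decide (x ∉ T)) ≠ [] := fun hh => h1 (hiff.mp hh)
          have hex : ∃ x ∈ v, x ∉ T := by
            push_neg at h1
            exact h1
          simp [hf, h2, hex]
    rw [hentry]
    simp

theorem pvInner_zero (v : List Int) (need : PySem.Dict Int Int) (acc : List Int)
    (h0 : ∀ x, need.getD x 0 = 0) :
    v.foldl pvInnerF (need, acc) = (need, acc ++ v) := by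
  induction v generalizing acc with
  | nil => simp
  | cons y v ih =>
    have hz : ¬(need.getD y 0 > 0) := by rw [h0 y]; simp
    rw [List.foldl_cons]
    show v.foldl pvInnerF (pvInnerF (need, acc) y) = _
    rw [pvInnerF, if_neg hz, ih (acc ++ [y])]
    simp

theorem pvMain_zero (items : List (String × List Int)) (need : PySem.Dict Int Int)
    (acc : List (String × Option (List Int))) (h0 : ∀ x, need.getD x 0 = 0) :
    (items.foldl pvMainF (need, acc)).2 = acc ++ items.map (fun kv => (kv.1, some kv.2)) := by
  induction items generalizing acc with
  | nil => simp
  | cons kv items ih =>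
    obtain ⟨k, v⟩ := kv
    rw [List.foldl_cons]
    show (items.foldl pvMainF (pvMainF (need, acc) (k, v))).2 = _
    simp only [pvMainF]
    rw [pvInner_zero v need [] h0]
    have hcond : (if ([] ++ v : List Int) ≠ [] ∨ v = [] then some ([] ++ v : List Int) else none) = some v := by
      by_cases h : v = [] <;> simp [h]
    simp only [hcond]
    rw [ih (acc ++ [(k, some v)])]
    simp

theorem pvCountA_cons (k : String) (ov : Option (List Int)) (rest : List (String × Option (List Int))) (x : Int) :
    pvCountA ((k, ov) :: rest) x = pvCountA rest x + (if pvHas ov x then 1 else 0) := by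
  simp [pvCountA, List.countP_cons]

theorem pvReplace_spec (d : List (String × Option (List Int))) (e : Int)
    (hnd : ∀ kv ∈ d, ((kv.2 : Option (List Int)).getD []).Nodup) (hc : 0 < pvCountA d e) :
    ∃ d', pvA_replace d e = some d' ∧ (∀ kv ∈ d', ((kv.2 : Option (List Int)).getD []).Nodup) ∧
      pvCountA d' e = pvCountA d e - 1 ∧ ∀ x, x ≠ e → pvCountA d' x = pvCountA d x := by
  induction d with
  | nil => simp [pvCountA] at hc
  | cons kv rest ih =>
    obtain ⟨k, ov⟩ := kv
    have hndr : ∀ kv ∈ rest, ((kv.2 : Option (List Int)).getD []).Nodup :=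
      fun kv h => hnd kv (List.mem_cons_of_mem _ h)
    cases ov with
    | none =>
      have hc' : 0 < pvCountA rest e := by
        rw [pvCountA_cons] at hc
        simpa [pvHas] using hc
      obtain ⟨d', hrep, hnd', he1, he2⟩ := ih hndr hc'
      refine ⟨(k, none) :: d', by simp [pvA_replace, hrep], ?_, ?_, ?_⟩
      · intro kv hkv
        rcases List.mem_cons.mp hkv with h | h
        · subst h; simp
        · exact hnd' kv h
      · rw [pvCountA_cons, pvCountA_cons, he1]
        simp [pvHas]
      · intro x hx
        rw [pvCountA_cons, pvCountA_cons, he2 x hx]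
    | some w =>
      have hwnd : w.Nodup := by simpa using hnd (k, some w) List.mem_cons_self
      by_cases he : e ∈ w
      · refine ⟨(k, if w.filter (fun x => x ≠ e) = [] then none else some (w.filter (fun x => x ≠ e))) :: rest,
          by simp [pvA_replace, he], ?_, ?_, ?_⟩
        · intro kv hkv
          rcases List.mem_cons.mp hkv with h | h
          · subst h
            dsimp only
            by_cases hnil : w.filter (fun x => x ≠ e) = []
            · rw [if_pos hnil]
              simp
            · rw [if_neg hnil]
              simpa using hwnd.filter _
          · exact hnd kv (List.mem_cons_of_mem _ h)
        · have hafter : pvHas (if w.filter (fun x => x ≠ e) = [] then none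
              else some (w.filter (fun x => x ≠ e))) e = false := by
            by_cases hnil : w.filter (fun x => x ≠ e) = []
            · rw [if_pos hnil]; rfl
            · rw [if_neg hnil]
              simp [pvHas]
          rw [pvCountA_cons, pvCountA_cons, hafter]
          simp [pvHas, he]
        · intro x hx
          have hmem : pvHas (if w.filter (fun x => x ≠ e) = [] then none
              else some (w.filter (fun x => x ≠ e))) x = pvHas (some w) x := by
            by_cases hnil : w.filter (fun x => x ≠ e) = []
            · rw [if_pos hnil]
              have hxw : x ∉ w := by
                intro hxw
                have hin : x ∈ w.filter (fun y => decide (y ≠ e)) := List.mem_filter.mpr ⟨hxw, by simp [hx]⟩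
                rw [hnil] at hin
                simp at hin
              simp [pvHas, hxw]
            · rw [if_neg hnil]
              simp only [pvHas]
              rw [decide_eq_decide, List.mem_filter]
              simp [hx]
          rw [pvCountA_cons, pvCountA_cons, hmem]
      · have hc' : 0 < pvCountA rest e := by
          rw [pvCountA_cons] at hc
          simpa [pvHas, he] using hc
        obtain ⟨d', hrep, hnd', he1, he2⟩ := ih hndr hc'
        refine ⟨(k, some w) :: d', by simp [pvA_replace, he, hrep], ?_, ?_, ?_⟩
        · intro kv hkv
          rcases List.mem_cons.mp hkv with h | h
          · subst h; simpa using hwnd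
          · exact hnd' kv h
        · rw [pvCountA_cons, pvCountA_cons, he1]
          simp [pvHas, he]
        · intro x hx
          rw [pvCountA_cons, pvCountA_cons, he2 x hx]

theorem pvLoop_spec (count : Int) (hcnt : 0 ≤ count) :
    ∀ (fuel : Nat) (es : List Int) (d : List (String × Option (List Int))),
    (∀ kv ∈ d, ((kv.2 : Option (List Int)).getD []).Nodup) →
    (∀ x, es.count x = pvCountA d x) →
    (((es.length : Int) - count).toNat < fuel) →
    pvA_loop fuel d es count = List.foldl pvStep d (es.take (((es.length : Int) - count).toNat)) := by
  intro fuel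
  induction fuel with
  | zero =>
    intro es d _ _ hf
    exact absurd hf (Nat.not_lt_zero _)
  | succ m ih =>
    intro es d hnd hinv hf
    by_cases hgt : (es.length : Int) > count
    · cases es with
      | nil =>
        simp at hgt
        omega
      | cons e es' =>
        have hce : 0 < pvCountA d e := by
          rw [← hinv e]
          simp
        obtain ⟨d', hrep, hnd', he1, he2⟩ := pvReplace_spec d e hnd hce
        have hinv' : ∀ x, es'.count x = pvCountA d' x := by
          intro x
          by_cases hx : x = e
          · subst hx
            have hthis := hinv x
            simp [List.count_cons_self] at hthis
            rw [he1, ← hthis]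
            omega
          · rw [he2 x hx, ← hinv x]
            simp [List.count_cons, hx]
            exact fun hh => hx hh.symm
        have hf' : ((es'.length : Int) - count).toNat < m := by
          have hlen : (e :: es').length = es'.length + 1 := rfl
          rw [hlen] at hf
          push_cast at hf
          omega
        have hn : ((((e :: es').length : Int) - count)).toNat = (((es'.length : Int) - count)).toNat + 1 := by
          have hlen : (e :: es').length = es'.length + 1 := rfl
          rw [hlen] at hgt ⊢
          push_cast at hgt ⊢
          omega
        rw [pvA_loop, if_pos hgt]
        simp only [hrep]
        rw [List.erase_cons_head, ih es' d' hnd' hinv' hf', hn, List.take_succ_cons, List.foldl_cons]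
        have hstep : pvStep d e = d' := by simp [pvStep, hrep]
        rw [hstep]
    · have h0 : (((es.length : Int) - count)).toNat = 0 := by omega
      rw [h0]
      rw [pvA_loop.eq_def]
      simp [hgt]

theorem pvFlatten_eq (removed : List (String × Option (List Int))) (acc : List Int) :
    removed.foldl (fun acc kv => match kv.2 with | some w => acc ++ w | none => acc) acc =
      acc ++ (pvItemsB removed).flatMap (fun kv => kv.2) := by
  induction removed generalizing acc with
  | nil => simp [pvItemsB]
  | cons kv rest ih =>
    obtain ⟨k, ov⟩ := kv
    cases ov with
    | none => simp [pvItemsB, List.foldl_cons, ih]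
    | some w =>
      rw [List.foldl_cons]
      show rest.foldl _ (acc ++ w) = _
      rw [ih (acc ++ w)]
      simp [pvItemsB]

theorem pvFilter_eq_map_items (removed : List (String × Option (List Int))) :
    removed.filter (fun kv => kv.2.isSome) = (pvItemsB removed).map (fun kv => (kv.1, some kv.2)) := by
  induction removed with
  | nil => simp [pvItemsB]
  | cons kv rest ih =>
    obtain ⟨k, ov⟩ := kv
    cases ov with
    | none => simpa [pvItemsB, List.filter_cons] using ih
    | some w => simpa [pvItemsB, List.filter_cons] using ih

theorem pvCount_flat (items : List (String × List Int)) (hv : ∀ kv ∈ items, (kv.2 : List Int).Nodup) (x : Int) :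
    (items.flatMap (fun kv => kv.2)).count x = pvCountA (items.map (fun kv => (kv.1, some kv.2))) x := by
  induction items with
  | nil => simp [pvCountA]
  | cons kv rest ih =>
    obtain ⟨k, v⟩ := kv
    have hvnd : v.Nodup := hv (k, v) List.mem_cons_self
    have hv' : ∀ p ∈ rest, (p.2 : List Int).Nodup := fun p hp => hv p (List.mem_cons_of_mem _ hp)
    rw [List.map_cons, List.flatMap_cons, List.count_append, pvCountA_cons, ih hv']
    have hcv : v.count x = if pvHas (some v) x then 1 else 0 := by
      by_cases hx : x ∈ v
      · rw [List.count_eq_one_of_mem hvnd hx]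
        simp [pvHas, hx]
      · rw [List.count_eq_zero_of_not_mem hx]
        simp [pvHas, hx]
    rw [hcv]
    have hred : pvHas (some (k, v).2) x = pvHas (some v) x := rfl
    rw [hred]
    omega

theorem pvTotalLen_eq (removed : List (String × Option (List Int))) :
    pvTotalLen removed = (((pvItemsB removed).flatMap (fun kv => kv.2)).length : Int) := by
  suffices h : ∀ acc : Int, removed.foldl (fun a kv => a + ((kv.2.getD []).length : Int)) acc =
      acc + (((pvItemsB removed).flatMap (fun kv => kv.2)).length : Int) by
    simpa [pvTotalLen] using h 0
  induction removed with
  | nil => simp [pvItemsB]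
  | cons kv rest ih =>
    intro acc
    obtain ⟨k, ov⟩ := kv
    cases ov with
    | none => simp [pvItemsB, List.foldl_cons, ih]
    | some w =>
      rw [List.foldl_cons]
      show rest.foldl _ (acc + (w.length : Int)) = _
      rw [ih]
      simp [pvItemsB]
      ring

theorem pvItemsB_nodup (removed : List (String × Option (List Int)))
    (h : ∀ kv ∈ removed, ((kv.2 : Option (List Int)).getD []).Nodup) :
    ∀ kv ∈ pvItemsB removed, (kv.2 : List Int).Nodup := by
  induction removed with
  | nil => simp [pvItemsB]
  | cons kv rest ih =>
    obtain ⟨k, ov⟩ := kv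
    have hr := ih (fun kv hkv => h kv (List.mem_cons_of_mem _ hkv))
    cases ov with
    | none => simpa [pvItemsB] using hr
    | some w =>
      intro p hp
      rcases List.mem_cons.mp (by simpa [pvItemsB] using hp) with h1 | h1
      · subst h1
        simpa using h (k, some w) List.mem_cons_self
      · exact hr p h1

-- the whole equivalence, for an arbitrary element list es that is a permutation of the flattened values
theorem pvMain_core (items : List (String × List Int)) (es : List Int) (count : Int)
    (hperm : es.Perm (items.flatMap (fun kv => kv.2))) (hc0 : 0 ≤ count)
    (hdisj : (∀ kv ∈ items, (kv.2 : List Int).Nodup) ∨ (es.length : Int) ≤ count) :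
    pvA_loop (es.length + 1) (items.map (fun kv => (kv.1, some kv.2))) es count =
      (items.foldl pvMainF
        ((PySem.List.slice es none (some (max 0 ((es.length : Int) - count)))).foldl
          (fun d x => d.insert x (d.getD x 0 + 1)) PySem.Dict.empty, [])).2 := by
  have hslice : PySem.List.slice es none (some (max 0 ((es.length : Int) - count))) =
      es.take (((es.length : Int) - count).toNat) := by
    rw [PySem.List.slice_to es (le_max_left 0 _)]
    congr 1
    rcases le_total 0 ((es.length : Int) - count) with h | h
    · rw [max_eq_right h]
    · rw [max_eq_left h]
      omega
  rw [hslice]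
  rcases hdisj with hnodup | htot
  · have hndmap : ∀ kv ∈ items.map (fun kv => (kv.1, some kv.2)),
        ((kv.2 : Option (List Int)).getD []).Nodup := by
      intro kv hkv
      rcases List.mem_map.mp hkv with ⟨p, hp, rfl⟩
      simpa using hnodup p hp
    have hinv : ∀ x, es.count x = pvCountA (items.map (fun kv => (kv.1, some kv.2))) x := by
      intro x
      rw [hperm.count_eq x]
      exact pvCount_flat items hnodup x
    have hfuel : ((es.length : Int) - count).toNat < es.length + 1 := by omega
    rw [pvLoop_spec count hc0 (es.length + 1) es _ hndmap hinv hfuel]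
    have hRinit : ∀ x, ((es.take (((es.length : Int) - count).toNat)).foldl
        (fun d x => d.insert x (d.getD x 0 + 1)) PySem.Dict.empty).getD x 0 =
        (((es.take (((es.length : Int) - count).toNat)).count x : Nat) : Int) := by
      intro x
      rw [PySem.Dict.getD_foldl_insert_add_one]
      simp
    rw [pvMain_spec items (es.take (((es.length : Int) - count).toNat)) _ [] hnodup hRinit]
    simp
  · have h0 : (((es.length : Int) - count)).toNat = 0 := by omega
    rw [h0, List.take_zero]
    have hngt : ¬((es.length : Int) > count) := by omega
    rw [pvA_loop.eq_def]
    simp only [List.foldl_nil, hngt, if_false]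
    rw [pvMain_zero items PySem.Dict.empty [] (fun x => by simp)]
    simp

-- ===== VERDICT (by name: the statement is the Claim_ definition above) =====
theorem remove_needless_result_spec : Claim_equal_remove_needless_result := by
  intro removed method count _ hpre
  obtain ⟨hc0, _hkeys, hdisj⟩ := hpre
  unfold Spec_remove_needless_result
  have hflat := pvFlatten_eq removed []
  simp only [List.nil_append] at hflat
  simp only [remove_needless_result, remove_needless_result_alt, hflat, pvFilter_eq_map_items]
  apply pvMain_core
  · cases hm : (method == "first")
    · simpa using PySem.List.sorted_perm ((pvItemsB removed).flatMap (fun kv => kv.2)) (fun x => x) false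
    · simp only [if_pos rfl]
      exact (List.reverse_perm _).trans
        (PySem.List.sorted_perm ((pvItemsB removed).flatMap (fun kv => kv.2)) (fun x => x) false)
  · exact hc0
  · rcases hdisj with hnodup | htot
    · exact Or.inl (pvItemsB_nodup removed hnodup)
    · refine Or.inr ?_
      have hlen : (if method == "first"
          then (PySem.List.sorted ((pvItemsB removed).flatMap (fun kv => kv.2)) (fun x => x) false).reverse
          else PySem.List.sorted ((pvItemsB removed).flatMap (fun kv => kv.2)) (fun x => x) false).length =
          ((pvItemsB removed).flatMap (fun kv => kv.2)).length := by
        cases (method == "first") <;> simp [PySem.List.length_sorted]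
      rw [hlen]
      rw [pvTotalLen_eq] at htot
      exact htot
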